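-- pv_equiv track=rewrite | github.com/AustinLowey/SpotifyFestivalPlaylistGenerator | spotipy_utils.py | capitalize_genre
-- ===== SOURCE A (Python) =====
-- def capitalize_genre(genre):
--     """
--     Title case genre and capitalize acronyms if in the acronyms dictionary.
--
--     Parameters:
--         genre (str): Input genre.
--
--     Returns:
--         str: Capitalized genre.
--
--     Examples:
--         'funk rock'  -> 'Funk Rock'
--         'edm'        -> 'EDM'
--         'pov: indie' -> 'POV: Indie'
--         'uk garage'  -> 'UK Garage'
--
--     List of all 6,300 Spotify genres available at https://everynoise.com/everynoise1d.cgi?scope=all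
--     """
--
--     # Acronyms (dict keys) and what they'll be replaced with (dict values). Can add to this over time
--     acronyms = {'Edm': 'EDM',
--                 'Dnb': 'DnB',
--                 'Uk': 'UK',
--                 'Pov': 'POV',
--                 'Mbp': 'MBP',
--                 'Atl': 'ATL',
--                 'Nyc': 'NYC',
--                 }
--
--     # Convert the genre string to the preferred capitalization format
--     genre = genre.title()
--     for key, value in acronyms.items():
--         if key in genre:
--             genre = genre.replace(key, value)
--
--     return genre
-- ===== SOURCE B (Python) =====
-- import re
--
-- _SUBS = {'Edm': 'EDM', 'Dnb': 'DnB', 'Uk': 'UK', 'Pov': 'POV',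
--          'Mbp': 'MBP', 'Atl': 'ATL', 'Nyc': 'NYC'}
-- # case-sensitive alternation, no \b and no IGNORECASE: one simultaneous pass
-- _PAT = re.compile('|'.join(map(re.escape, _SUBS)))
--
--
-- def _title(s):
--     # title-case by pairing each char with its predecessor (sentinel ' ')
--     return ''.join(
--         (c.lower() if p.isalpha() else c.upper()) if c.isalpha() else c
--         for p, c in zip(' ' + s, s))
--
--
-- def capitalize_genre(genre):
--     return _PAT.sub(lambda m: _SUBS[m.group()], _title(genre))
-- ===== Notes on version B (the rewrite author's own statement) =====
-- stated objective: alternative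
-- what changed: A calls str.title() and then runs seven sequential full-string str.replace passes, one per acronym key; B title-cases with its own zip-with-predecessor pass and then makes ONE simultaneous left-to-right scan with a precompiled case-sensitive regex alternation over the keys, replacing each match via dict lookup.
-- intended difference: On genres whose title-cased form contains 'Edmbp', A's sequential passes cascade (replacing 'Edm'->'EDM' creates an 'Mbp' which the later 'Mbp'->'MBP' pass also rewrites) so A returns '...EDMBP...', while B's single simultaneous pass returns '...EDMbp...', the intended value since only acronyms actually present in the title-cased genre should be uppercased. — e.g. on capitalize_genre("edmbp"): A returns "EDMBP", B returns "EDMbp"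
import Mathlib
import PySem

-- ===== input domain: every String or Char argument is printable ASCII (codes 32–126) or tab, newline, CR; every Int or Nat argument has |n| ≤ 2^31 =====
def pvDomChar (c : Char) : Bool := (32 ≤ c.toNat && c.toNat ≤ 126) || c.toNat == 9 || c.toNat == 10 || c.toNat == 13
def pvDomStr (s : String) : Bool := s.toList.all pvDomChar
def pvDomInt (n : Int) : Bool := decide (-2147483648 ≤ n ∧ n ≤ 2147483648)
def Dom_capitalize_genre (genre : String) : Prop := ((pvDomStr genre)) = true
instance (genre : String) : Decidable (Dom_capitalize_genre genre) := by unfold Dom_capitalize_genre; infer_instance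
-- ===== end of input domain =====

-- B replaces A's str.title() + seven sequential full-string str.replace passes with its own
-- zip-with-predecessor title-casing pass and ONE simultaneous left-to-right scan (a regex
-- alternation over the acronym keys); on the exceptional inputs D_ below (title-cased form
-- containing "Edmbp") A's passes cascade and B returns the intended value.

-- ===== PORT A =====
-- str.title() : a cased (here: ASCII letter) char is uppercased after a non-letter
-- (or at the start) and lowercased after a letter; other chars pass through.
-- (exact for the printable-ASCII domain; ported by hand, PySem has no `title`)
def titleStep (prevAlpha : Bool) (c : Char) : Char :=
  if PySem.Chars.isalpha c then
    (if prevAlpha then PySem.Chars.lowerChar c else PySem.Chars.upperChar c)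
  else c

-- the builder loop carries the output as an accumulator (reversed at the end) so it
-- runs in constant stack, like Python's char-append loop
def titleGo (acc : List Char) (prevAlpha : Bool) : List Char → List Char
  | [] => acc.reverse
  | c :: t => titleGo (titleStep prevAlpha c :: acc) (PySem.Chars.isalpha c) t

def titleChars (cs : List Char) : List Char := titleGo [] false cs

-- the `acronyms` dict literal (distinct keys, so .items() is this list, in order)
def acronyms : List (List Char × List Char) :=
  [("Edm".toList, "EDM".toList), ("Dnb".toList, "DnB".toList), ("Uk".toList, "UK".toList),
   ("Pov".toList, "POV".toList), ("Mbp".toList, "MBP".toList), ("Atl".toList, "ATL".toList),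
   ("Nyc".toList, "NYC".toList)]

-- A: genre = genre.title(); for key, value in acronyms.items(): if key in genre: genre = genre.replace(key, value)
-- (PySem.Chars.isIn / PySem.Chars.replace are exactly `in` / str.replace on .toList)
def capitalize_genre (genre : String) : String :=
  String.ofList (List.foldl
    (fun g kv => if PySem.Chars.isIn kv.1 g then PySem.Chars.replace g kv.1 kv.2 else g)
    (titleChars genre.toList) acronyms)

-- ===== PORT B =====
-- B's _title: ''.join over zip(' ' + s, s) — each char paired with its predecessor
-- (sentinel ' '), mapped in one comprehension (no accumulator loop)
def titleB (cs : List Char) : List Char :=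
  ((' ' :: cs).zip cs).map (fun pc =>
    if PySem.Chars.isalpha pc.2 then
      (if PySem.Chars.isalpha pc.1 then PySem.Chars.lowerChar pc.2 else PySem.Chars.upperChar pc.2)
    else pc.2)

-- the compiled alternation: the ordered literal alternatives with their replacements
def subsB : List (List Char × List Char) :=
  [(['E','d','m'], ['E','D','M']), (['D','n','b'], ['D','n','B']),
   (['U','k'], ['U','K']), (['P','o','v'], ['P','O','V']),
   (['M','b','p'], ['M','B','P']), (['A','t','l'], ['A','T','L']),
   (['N','y','c'], ['N','Y','C'])]

-- B: _PAT.sub(lookup, _title(genre)) — one left-to-right pass: at each position try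
-- the alternatives in order (regex alternation, all literals); on a match emit the
-- replacement and resume after the match, else copy the char.
-- `fuel` (= initial length) is only a structural-termination guard: a nonempty key
-- consumes at least one char per step, so fuel never runs out.
def scanGo (R : List (List Char × List Char)) : Nat → List Char → List Char
  | _, [] => []
  | 0, l => l
  | fuel + 1, c :: t =>
    match R.find? (fun r => !r.1.isEmpty && r.1.isPrefixOf (c :: t)) with
    | some (k, v) => v ++ scanGo R fuel (t.drop (k.length - 1))
    | none => c :: scanGo R fuel t

def scanSub (R : List (List Char × List Char)) (l : List Char) : List Char :=
  scanGo R l.length l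

def capitalize_genre_alt (genre : String) : String :=
  String.ofList (scanSub subsB (titleB genre.toList))

-- ===== PRECONDITION & SPEC =====
-- On genres whose title-cased form contains "Edmbp" (a word beginning, case-insensitively,
-- with 'edmbp'), A's sequential replaces cascade — replacing 'Edm'→'EDM' creates an 'Mbp' occurrence
-- which the later 'Mbp'→'MBP' pass also rewrites, so A returns '…EDMBP…' — while B's
-- single simultaneous pass returns the intended '…EDMbp…' (only acronyms actually
-- present in the title-cased genre are uppercased).
def D_capitalize_genre (genre : String) : Prop :=
  PySem.Str.isIn "Edmbp" (String.ofList (titleChars genre.toList)) = true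
instance (genre : String) : Decidable (D_capitalize_genre genre) := by
  unfold D_capitalize_genre; infer_instance

def Spec_capitalize_genre (genre : String) (out : String) : Prop :=
  ¬ D_capitalize_genre genre → out = capitalize_genre_alt genre
instance (genre : String) (out : String) : Decidable (Spec_capitalize_genre genre out) := by
  unfold Spec_capitalize_genre; infer_instance

def pvDiffWitness_capitalize_genre : String := "edmbp"
def pvDiffWitnessOut_capitalize_genre : String × String := ("EDMBP", "EDMbp")

-- ===== CLAIM (what is proved, stated in full; the proofs are below) =====
def Claim_unchanged_capitalize_genre : Prop := ∀ (genre : String), Dom_capitalize_genre genre → Spec_capitalize_genre genre (capitalize_genre genre)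
def Claim_exact_capitalize_genre : Prop := ∀ (genre : String), Dom_capitalize_genre genre → D_capitalize_genre genre → capitalize_genre genre ≠ capitalize_genre_alt genre
def Claim_changed_capitalize_genre : Prop := Dom_capitalize_genre (pvDiffWitness_capitalize_genre) ∧ D_capitalize_genre (pvDiffWitness_capitalize_genre) ∧ capitalize_genre (pvDiffWitness_capitalize_genre) = pvDiffWitnessOut_capitalize_genre.1 ∧ capitalize_genre_alt (pvDiffWitness_capitalize_genre) = pvDiffWitnessOut_capitalize_genre.2 ∧ pvDiffWitnessOut_capitalize_genre.1 ≠ pvDiffWitnessOut_capitalize_genre.2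

-- ===== LEMMAS AND PROOFS =====

-- B's zip-with-predecessor title pass computes A's accumulator title pass
theorem titleGo_zip (cs : List Char) : ∀ (acc : List Char) (p : Char),
    titleGo acc (PySem.Chars.isalpha p) cs
      = acc.reverse ++ ((p :: cs).zip cs).map (fun pc =>
          if PySem.Chars.isalpha pc.2 then
            (if PySem.Chars.isalpha pc.1 then PySem.Chars.lowerChar pc.2
             else PySem.Chars.upperChar pc.2)
          else pc.2) := by
  induction cs with
  | nil => intro acc p; simp [titleGo]
  | cons c t IH =>
    intro acc p
    simp only [titleGo, List.zip_cons_cons, List.map_cons]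
    rw [IH (titleStep (PySem.Chars.isalpha p) c :: acc) c]
    simp [titleStep]

theorem titleB_eq (cs : List Char) : titleB cs = titleChars cs := by
  have h := titleGo_zip cs [] ' '
  have hsp : PySem.Chars.isalpha ' ' = false := by decide
  rw [hsp] at h
  simpa [titleB, titleChars] using h.symm

theorem subsB_eq : subsB = acronyms := by decide

theorem scanGo_eq (R : List (List Char × List Char)) :
    ∀ (fuel : Nat) (l : List Char), l.length ≤ fuel → scanGo R fuel l = scanGo R l.length l := by
  intro fuel
  induction fuel using Nat.strong_induction_on with
  | _ fuel IH =>
    intro l hl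
    cases fuel with
    | zero => cases l with
      | nil => rfl
      | cons c t => simp at hl
    | succ n =>
      cases l with
      | nil => rfl
      | cons c t =>
        have hlt : t.length ≤ n := by simpa using hl
        simp only [scanGo, List.length_cons]
        cases hf : List.find? (fun r => !r.1.isEmpty && r.1.isPrefixOf (c :: t)) R with
        | some r =>
          obtain ⟨k, v⟩ := r
          simp only []
          rw [IH n (by omega) _ (by simp; omega), IH t.length (by omega) _ (by simp)]
        | none =>
          simp only []
          rw [IH n (by omega) _ hlt]
theorem scanSub_cons_some {R : List (List Char × List Char)} {c : Char} {t k v : List Char}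
    (h : R.find? (fun r => !r.1.isEmpty && r.1.isPrefixOf (c :: t)) = some (k, v)) :
    scanSub R (c :: t) = v ++ scanSub R (t.drop (k.length - 1)) := by
  unfold scanSub
  simp only [List.length_cons, scanGo, h]
  rw [scanGo_eq _ _ _ (by simp)]
theorem scanSub_cons_none {R : List (List Char × List Char)} {c : Char} {t : List Char}
    (h : R.find? (fun r => !r.1.isEmpty && r.1.isPrefixOf (c :: t)) = none) :
    scanSub R (c :: t) = c :: scanSub R t := by
  unfold scanSub
  simp only [List.length_cons, scanGo, h]
theorem prefix_append_cases {k w s : List Char} (h : k <+: w ++ s) : k <+: w ∨ w <+: k := by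
  by_cases hle : k.length ≤ w.length
  · exact Or.inl (List.prefix_of_prefix_length_le h (List.prefix_append w s) hle)
  · exact Or.inr (List.prefix_of_prefix_length_le (List.prefix_append w s) h (by omega))
theorem scan_skip (R : List (List Char × List Char)) (w s : List Char)
    (h : ∀ j, j < w.length → ∀ r ∈ R, r.1 ≠ [] → ¬ (r.1 <+: (w.drop j ++ s))) :
    scanSub R (w ++ s) = w ++ scanSub R s := by
  induction w with
  | nil => rfl
  | cons c w' IH =>
    have hf : List.find? (fun r => !r.1.isEmpty && r.1.isPrefixOf (c :: (w' ++ s))) R = none := by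
      rw [List.find?_eq_none]
      intro r hr
      simp only [Bool.and_eq_false_iff, Bool.not_eq_eq_eq_not, Bool.not_eq_true]
      by_cases hr1 : r.1 = []
      · left; simp [hr1]
      · right
        rw [← Bool.not_eq_true, List.isPrefixOf_iff_prefix]
        exact h 0 (by simp) r hr hr1
    rw [List.cons_append, scanSub_cons_none hf,
      IH (fun j hj r hr hr1 => h (j + 1) (by simp; omega) r hr hr1)]
    simp
theorem scan_prefix_reflect (R : List (List Char × List Char))
    (hv : ∀ r ∈ R, r.2 ≠ []) (w : List Char)
    (hw : ∀ c ∈ w, ∀ r ∈ R, r.2.head? ≠ some c) :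
    ∀ u, w <+: scanSub R u → w <+: u := by
  intro u
  induction u generalizing w with
  | nil =>
    intro hp
    rw [show scanSub R [] = [] from rfl, List.prefix_nil] at hp
    simp [hp]
  | cons c t IH =>
    intro hp
    cases hf : List.find? (fun r => !r.1.isEmpty && r.1.isPrefixOf (c :: t)) R with
    | some r =>
      obtain ⟨k, v⟩ := r
      rw [scanSub_cons_some hf] at hp
      cases w with
      | nil => exact List.nil_prefix
      | cons a w' =>
        exfalso
        have hrm := List.mem_of_find?_eq_some hf
        obtain ⟨v1, vr, hv2⟩ : ∃ v1 vr, v = v1 :: vr := by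
          cases hv0 : v with
          | nil => exact absurd (by simpa using hv0) (hv (k, v) hrm)
          | cons v1 vr => exact ⟨v1, vr, rfl⟩
        rw [hv2, List.cons_append, List.cons_prefix_cons] at hp
        exact hw a (by simp) (k, v) hrm (by rw [hv2]; simp [← hp.1])
    | none =>
      rw [scanSub_cons_none hf] at hp
      cases w with
      | nil => exact List.nil_prefix
      | cons a w' =>
        rw [List.cons_prefix_cons] at hp ⊢
        exact ⟨hp.1, IH w' (fun c' hc' => hw c' (by simp [hc'])) hp.2⟩
theorem replace_go_eq (k v : List Char) (hk : k ≠ []) :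
    ∀ (fuel : Nat) (l acc : List Char), l.length ≤ fuel →
      PySem.Chars.replace.go k v fuel l acc = acc.reverse ++ scanSub [(k, v)] l := by
  intro fuel
  induction fuel with
  | zero =>
    intro l acc hl
    rw [List.length_eq_zero_iff.mp (Nat.le_zero.mp hl)]
    simp [PySem.Chars.replace.go]
    rfl
  | succ n IH =>
    intro l acc hl
    cases l with
    | nil => simp [PySem.Chars.replace.go]; rfl
    | cons c t =>
      have hl' : t.length + 1 ≤ n + 1 := by simpa using hl
      rw [PySem.Chars.replace.go]
      by_cases hp : k.isPrefixOf (c :: t)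
      · rw [if_pos hp]
        have hkl : 1 ≤ k.length := by cases k with | nil => simp at hk | cons a b => simp
        rw [IH _ _ (by simp; omega)]
        have hfind : List.find? (fun r => !r.1.isEmpty && r.1.isPrefixOf (c :: t)) [(k, v)]
            = some (k, v) := by
          simp [List.find?, hp, List.isEmpty_eq_false_iff.mpr hk]
        rw [scanSub_cons_some hfind]
        have : List.drop k.length (c :: t) = List.drop (k.length - 1) t := by
          cases hkk : k with
          | nil => exact absurd hkk hk
          | cons a b => simp
        simp [this]
      · rw [if_neg hp]
        rw [IH _ _ (by simpa using hl)]
        have hfind : List.find? (fun r => !r.1.isEmpty && r.1.isPrefixOf (c :: t)) [(k, v)]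
            = none := by
          simp [List.find?, hp]
        rw [scanSub_cons_none hfind]
        simp
theorem replace_eq_scan1 (g k v : List Char) (hk : k ≠ []) :
    PySem.Chars.replace g k v = scanSub [(k, v)] g := by
  unfold PySem.Chars.replace
  rw [if_neg (by simpa using hk)]
  simpa using replace_go_eq k v hk g.length g [] le_rfl
theorem scan1_of_not_infix (k v : List Char) :
    ∀ s, ¬ (k <:+: s) → scanSub [(k, v)] s = s := by
  intro s
  induction s with
  | nil => intro _; rfl
  | cons c t IH =>
    intro h
    have hfind : List.find? (fun r => !r.1.isEmpty && r.1.isPrefixOf (c :: t)) [(k, v)]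
        = none := by
      simp only [List.find?_cons]
      have : ¬ k.isPrefixOf (c :: t) := fun hp =>
        h ((List.isPrefixOf_iff_prefix.mp hp).isInfix)
      simp [this]
    rw [scanSub_cons_none hfind, IH (fun hi => h (hi.trans (List.suffix_cons c t).isInfix))]
theorem step_eq (g : List Char) (kv : List Char × List Char) (hk : kv.1 ≠ []) :
    (if PySem.Chars.isIn kv.1 g then PySem.Chars.replace g kv.1 kv.2 else g) = scanSub [kv] g := by
  obtain ⟨k, v⟩ := kv
  by_cases h : PySem.Chars.isIn k g
  · rw [if_pos h]; exact replace_eq_scan1 g k v hk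
  · rw [if_neg h]
    exact (scan1_of_not_infix k v g
      (fun hi => h ((PySem.Chars.isIn_iff_infix k g).mpr hi))).symm
theorem fusion (R : List (List Char × List Char)) (k v : List Char) (hk : k ≠ [])
    (hR : ∀ r ∈ R, r.1 ≠ [] ∧ r.2 ≠ [])
    (H2 : ∀ r ∈ R, ∀ j, j < r.2.length → ¬ (r.2.drop j <+: k) ∧ ¬ (k <+: r.2.drop j))
    (H3 : ∀ r ∈ R, ∀ j, 1 ≤ j → j < k.length → ¬ (r.1 <+: k.drop j) ∧ ¬ (k.drop j <+: r.1))
    (H4 : ∀ c ∈ k.tail, ∀ r ∈ R, r.2.head? ≠ some c) :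
    ∀ t, scanSub [(k, v)] (scanSub R t) = scanSub (R ++ [(k, v)]) t := by
  suffices H : ∀ n t, t.length ≤ n →
      scanSub [(k, v)] (scanSub R t) = scanSub (R ++ [(k, v)]) t from
    fun t => H t.length t le_rfl
  intro n
  induction n with
  | zero =>
    intro t ht
    rw [List.length_eq_zero_iff.mp (Nat.le_zero.mp ht)]
    rfl
  | succ n IH =>
    intro t ht
    cases t with
    | nil => rfl
    | cons c u =>
      have hu : u.length ≤ n := by simpa using ht
      cases hf : List.find? (fun r => !r.1.isEmpty && r.1.isPrefixOf (c :: u)) R with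
      | some r =>
        obtain ⟨kr, vr⟩ := r
        have hmem := List.mem_of_find?_eq_some hf
        have hfind' : List.find? (fun r => !r.1.isEmpty && r.1.isPrefixOf (c :: u))
            (R ++ [(k, v)]) = some (kr, vr) := by
          rw [List.find?_append, hf]; rfl
        rw [scanSub_cons_some hf, scanSub_cons_some hfind']
        rw [scan_skip [(k, v)] vr _ ?hskip]
        · rw [IH _ (le_trans (by simp) hu)]
        case hskip =>
          intro j hj r' hr' hr1 hpre
          have hr'e : r' = (k, v) := by simpa using hr'
          subst hr'e
          rcases prefix_append_cases hpre with hc | hc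
          · exact (H2 (kr, vr) hmem j hj).2 hc
          · exact (H2 (kr, vr) hmem j hj).1 hc
      | none =>
        have hnof : ∀ r ∈ R, r.1 ≠ [] → ¬ r.1 <+: (c :: u) := by
          intro r hr hr1 hp
          have h0 := List.find?_eq_none.mp hf r hr
          simp [List.isEmpty_eq_false_iff.mpr hr1, List.isPrefixOf_iff_prefix.mpr hp] at h0
        by_cases hkp : k <+: (c :: u)
        · have hfind' : List.find? (fun r => !r.1.isEmpty && r.1.isPrefixOf (c :: u))
              (R ++ [(k, v)]) = some (k, v) := by
            rw [List.find?_append, hf]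
            simp [List.find?, List.isEmpty_eq_false_iff.mpr hk,
              List.isPrefixOf_iff_prefix.mpr hkp]
          rw [scanSub_cons_some hfind']
          obtain ⟨s2, hs2⟩ := hkp
          have hpass : scanSub R (c :: u) = k ++ scanSub R s2 := by
            rw [← hs2]
            apply scan_skip
            intro j hj r hr hr1 hp
            rcases Nat.eq_zero_or_pos j with h0 | hpos
            · subst h0
              simp only [List.drop_zero] at hp
              exact hnof r hr hr1 (hs2 ▸ hp)
            · rcases prefix_append_cases hp with hc | hc
              · exact (H3 r hr j hpos hj).1 hc
              · exact (H3 r hr j hpos hj).2 hc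
          rw [hpass]
          cases k with
          | nil => exact absurd rfl hk
          | cons kh kt =>
            rw [show (kh :: kt) ++ scanSub R s2 = kh :: (kt ++ scanSub R s2) from rfl]
            have hfind1 : List.find? (fun r => !r.1.isEmpty &&
                r.1.isPrefixOf (kh :: (kt ++ scanSub R s2))) [(kh :: kt, v)]
                = some (kh :: kt, v) := by
              simp [List.find?, List.isPrefixOf_iff_prefix.mpr
                (show (kh :: kt) <+: kh :: (kt ++ scanSub R s2) by
                  rw [show kh :: (kt ++ scanSub R s2) = (kh :: kt) ++ scanSub R s2 from rfl]
                  exact List.prefix_append _ _)]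
            rw [scanSub_cons_some hfind1]
            rw [show List.drop ((kh :: kt).length - 1) (kt ++ scanSub R s2) = scanSub R s2 by
              simp]
            have hs2len : s2.length ≤ n := by
              have := congrArg List.length hs2
              simp at this; omega
            rw [IH s2 hs2len]
            have hdu : List.drop ((kh :: kt).length - 1) u = s2 := by
              have : kt ++ s2 = u := by
                have := hs2
                rw [List.cons_append] at this
                injection this with h1 h2
              rw [← this]; simp
            rw [hdu]
        · have hfind' : List.find? (fun r => !r.1.isEmpty && r.1.isPrefixOf (c :: u))
              (R ++ [(k, v)]) = none := by
            have : k.isPrefixOf (c :: u) = false := by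
              rw [← Bool.not_eq_true, List.isPrefixOf_iff_prefix]; exact hkp
            rw [List.find?_append, hf]
            simp [List.find?, this]
          rw [scanSub_cons_none hf, scanSub_cons_none hfind']
          have hfind1 : List.find? (fun r => !r.1.isEmpty &&
              r.1.isPrefixOf (c :: scanSub R u)) [(k, v)] = none := by
            have : ¬ k <+: (c :: scanSub R u) := by
              intro hpre
              cases k with
              | nil => exact hk rfl
              | cons kh kt =>
                rw [List.cons_prefix_cons] at hpre
                have hkt : kt <+: u :=
                  scan_prefix_reflect R (fun r hr => (hR r hr).2) kt
                    (fun c' hc' r hr => H4 c' (by simpa using hc') r hr) u hpre.2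
                exact hkp (List.cons_prefix_cons.mpr ⟨hpre.1, hkt⟩)
            have : k.isPrefixOf (c :: scanSub R u) = false := by
              rw [← Bool.not_eq_true, List.isPrefixOf_iff_prefix]; exact this
            simp [List.find?, this]
          rw [scanSub_cons_none hfind1, IH u hu]
def R4 : List (List Char × List Char) :=
  [(['E','d','m'], ['E','D','M']), (['D','n','b'], ['D','n','B']), (['U','k'], ['U','K']),
   (['P','o','v'], ['P','O','V'])]

def RX5 : List (List Char × List Char) :=
  [(['E','d','m','b','p'], ['E','D','M','B','P']), (['E','d','m'], ['E','D','M']), (['D','n','b'], ['D','n','B']),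
   (['U','k'], ['U','K']), (['P','o','v'], ['P','O','V']), (['M','b','p'], ['M','B','P'])]

-- one fusion step when the fired value cannot interact with the outer key
theorem fuse_step {R R' : List (List Char × List Char)} {k v : List Char} {c : Char}
    {u kr vr : List Char}
    (hf : List.find? (fun r => !r.1.isEmpty && r.1.isPrefixOf (c :: u)) R = some (kr, vr))
    (hf' : List.find? (fun r => !r.1.isEmpty && r.1.isPrefixOf (c :: u)) R' = some (kr, vr))
    (hsk : ∀ j, j < vr.length → ¬ (vr.drop j <+: k) ∧ ¬ (k <+: vr.drop j))
    (hrec : scanSub [(k, v)] (scanSub R (u.drop (kr.length - 1)))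
      = scanSub R' (u.drop (kr.length - 1))) :
    scanSub [(k, v)] (scanSub R (c :: u)) = scanSub R' (c :: u) := by
  rw [scanSub_cons_some hf, scanSub_cons_some hf']
  rw [scan_skip [(k, v)] vr _ ?hskip, hrec]
  case hskip =>
    intro j hj r' hr' hr1 hpre
    have hr'e : r' = (k, v) := by simpa using hr'
    subst hr'e
    rcases prefix_append_cases hpre with hc | hc
    · exact (hsk j hj).2 hc
    · exact (hsk j hj).1 hc

set_option maxRecDepth 4096 in
theorem fusionMbp : ∀ t, scanSub [(['M','b','p'], ['M','B','P'])] (scanSub R4 t) = scanSub RX5 t := by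
  suffices H : ∀ n t, t.length ≤ n →
      scanSub [(['M','b','p'], ['M','B','P'])] (scanSub R4 t) = scanSub RX5 t from
    fun t => H t.length t le_rfl
  intro n
  induction n with
  | zero =>
    intro t ht
    rw [List.length_eq_zero_iff.mp (Nat.le_zero.mp ht)]
    rfl
  | succ n IH =>
    intro t ht
    cases t with
    | nil => rfl
    | cons c u =>
      have hu : u.length ≤ n := by simpa using ht
      cases hf : List.find? (fun r => !r.1.isEmpty && r.1.isPrefixOf (c :: u)) R4 with
      | some r =>
        have hmem := List.mem_of_find?_eq_some hf
        have hpt := List.find?_some hf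
        rcases (show r = (['E','d','m'], ['E','D','M']) ∨ r = (['D','n','b'], ['D','n','B']) ∨
            r = (['U','k'], ['U','K']) ∨ r = (['P','o','v'], ['P','O','V']) by
          simpa [R4] using hmem) with rfl | rfl | rfl | rfl
        · -- Edm fired
          have hpre : ('E' :: 'd' :: 'm' :: []) <+: (c :: u) :=
            List.isPrefixOf_iff_prefix.mp (by simpa using hpt)
          obtain ⟨s2, hs2⟩ := hpre
          obtain ⟨rfl, rfl⟩ : c = 'E' ∧ u = 'd' :: 'm' :: s2 := by
            rw [List.cons_append, List.cons_append, List.cons_append, List.nil_append] at hs2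
            exact ⟨(List.cons.injEq _ _ _ _ ▸ hs2).1.symm, by
              have := (List.cons.injEq _ _ _ _ ▸ hs2).2
              exact this.symm⟩
          have hs2n : s2.length ≤ n := by simp at hu; omega
          by_cases hbp : ['b', 'p'] <+: s2
          · obtain ⟨w, hw⟩ := hbp
            rw [List.cons_append, List.cons_append, List.nil_append] at hw
            subst hw
            have hwn : w.length ≤ n := by simp at hu; omega
            rw [scanSub_cons_some hf]
            rw [show List.drop (['E','d','m'].length - 1) ('d' :: 'm' :: 'b' :: 'p' :: w)
              = 'b' :: 'p' :: w from rfl]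
            rw [scanSub_cons_none (R := R4) (by simp [R4, List.find?, List.isPrefixOf])]
            rw [scanSub_cons_none (R := R4) (by simp [R4, List.find?, List.isPrefixOf])]
            rw [show (['E','D','M'] : List Char) ++ 'b' :: 'p' :: scanSub R4 w
              = 'E' :: 'D' :: ('M' :: 'b' :: 'p' :: scanSub R4 w) from rfl]
            rw [scanSub_cons_none (by simp [List.find?, List.isPrefixOf])]
            rw [scanSub_cons_none (by simp [List.find?, List.isPrefixOf])]
            rw [scanSub_cons_some
              (show List.find? _ [(['M','b','p'], ['M','B','P'])]
                  = some (['M','b','p'], ['M','B','P']) by simp [List.find?, List.isPrefixOf])]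
            rw [scanSub_cons_some (R := RX5)
              (show List.find? _ RX5 = some (['E','d','m','b','p'], ['E','D','M','B','P']) by
                simp [RX5, List.find?, List.isPrefixOf])]
            rw [show List.drop (['E','d','m','b','p'].length - 1) ('d' :: 'm' :: 'b' :: 'p' :: w)
              = w from rfl]
            rw [show List.drop (['M','b','p'].length - 1) ('b' :: 'p' :: scanSub R4 w)
              = scanSub R4 w from rfl]
            rw [IH w hwn]
            rfl
          · have hbps : ¬ ['b', 'p'] <+: scanSub R4 s2 := fun h =>
              hbp (scan_prefix_reflect R4 (by decide) ['b', 'p'] (by simp [R4]) s2 h)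
            have hbpf : List.isPrefixOf ['b', 'p'] (scanSub R4 s2) = false := by
              rw [← Bool.not_eq_true, List.isPrefixOf_iff_prefix]; exact hbps
            have hbpf2 : List.isPrefixOf ['b', 'p'] s2 = false := by
              rw [← Bool.not_eq_true, List.isPrefixOf_iff_prefix]; exact hbp
            rw [scanSub_cons_some hf]
            rw [show List.drop (['E','d','m'].length - 1) ('d' :: 'm' :: s2) = s2 from rfl]
            rw [show (['E','D','M'] : List Char) ++ scanSub R4 s2
              = 'E' :: 'D' :: ('M' :: scanSub R4 s2) from rfl]
            rw [scanSub_cons_none (by simp [List.find?, List.isPrefixOf])]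
            rw [scanSub_cons_none (by simp [List.find?, List.isPrefixOf])]
            rw [scanSub_cons_none (by simp [List.find?, List.isPrefixOf, hbpf])]
            rw [scanSub_cons_some (R := RX5)
              (show List.find? _ RX5 = some (['E','d','m'], ['E','D','M']) by
                simp [RX5, List.find?, List.isPrefixOf, hbpf2])]
            rw [show List.drop (['E','d','m'].length - 1) ('d' :: 'm' :: s2) = s2 from rfl]
            rw [IH s2 hs2n]
            rfl
        · -- Dnb fired
          have hpre : ('D' :: 'n' :: 'b' :: []) <+: (c :: u) :=
            List.isPrefixOf_iff_prefix.mp (by simpa using hpt)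
          obtain ⟨s2, hs2⟩ := hpre
          obtain ⟨rfl, rfl⟩ : c = 'D' ∧ u = 'n' :: 'b' :: s2 := by
            rw [List.cons_append, List.cons_append, List.cons_append, List.nil_append] at hs2
            exact ⟨(List.cons.injEq _ _ _ _ ▸ hs2).1.symm, by
              have := (List.cons.injEq _ _ _ _ ▸ hs2).2
              exact this.symm⟩
          refine fuse_step hf (by simp [RX5, List.find?, List.isPrefixOf]) (by decide)
            (IH _ (by simp at hu ⊢; omega))
        · -- Uk fired
          have hpre : ('U' :: 'k' :: []) <+: (c :: u) :=
            List.isPrefixOf_iff_prefix.mp (by simpa using hpt)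
          obtain ⟨s2, hs2⟩ := hpre
          obtain ⟨rfl, rfl⟩ : c = 'U' ∧ u = 'k' :: s2 := by
            rw [List.cons_append, List.cons_append, List.nil_append] at hs2
            exact ⟨(List.cons.injEq _ _ _ _ ▸ hs2).1.symm, by
              have := (List.cons.injEq _ _ _ _ ▸ hs2).2
              exact this.symm⟩
          refine fuse_step hf (by simp [RX5, List.find?, List.isPrefixOf]) (by decide)
            (IH _ (by simp at hu ⊢; omega))
        · -- Pov fired
          have hpre : ('P' :: 'o' :: 'v' :: []) <+: (c :: u) :=
            List.isPrefixOf_iff_prefix.mp (by simpa using hpt)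
          obtain ⟨s2, hs2⟩ := hpre
          obtain ⟨rfl, rfl⟩ : c = 'P' ∧ u = 'o' :: 'v' :: s2 := by
            rw [List.cons_append, List.cons_append, List.cons_append, List.nil_append] at hs2
            exact ⟨(List.cons.injEq _ _ _ _ ▸ hs2).1.symm, by
              have := (List.cons.injEq _ _ _ _ ▸ hs2).2
              exact this.symm⟩
          refine fuse_step hf (by simp [RX5, List.find?, List.isPrefixOf]) (by decide)
            (IH _ (by simp at hu ⊢; omega))
      | none =>
        have hnof : ∀ r ∈ R4, ¬ r.1 <+: (c :: u) := by
          intro r hr hp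
          have h0 := List.find?_eq_none.mp hf r hr
          have hr1 : r.1 ≠ [] := by
            rcases (show r = (['E','d','m'], ['E','D','M']) ∨ r = (['D','n','b'], ['D','n','B']) ∨
                r = (['U','k'], ['U','K']) ∨ r = (['P','o','v'], ['P','O','V']) by
              simpa [R4] using hr) with rfl | rfl | rfl | rfl <;> decide
          simp [List.isEmpty_eq_false_iff.mpr hr1, List.isPrefixOf_iff_prefix.mpr hp] at h0
        by_cases hmbp : ('M' :: 'b' :: 'p' :: []) <+: (c :: u)
        · obtain ⟨s2, hs2⟩ := hmbp
          obtain ⟨rfl, rfl⟩ : c = 'M' ∧ u = 'b' :: 'p' :: s2 := by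
            rw [List.cons_append, List.cons_append, List.cons_append, List.nil_append] at hs2
            exact ⟨(List.cons.injEq _ _ _ _ ▸ hs2).1.symm, by
              have := (List.cons.injEq _ _ _ _ ▸ hs2).2
              exact this.symm⟩
          have hs2n : s2.length ≤ n := by simp at hu; omega
          rw [scanSub_cons_none hf]
          rw [scanSub_cons_none (R := R4) (by simp [R4, List.find?, List.isPrefixOf])]
          rw [scanSub_cons_none (R := R4) (by simp [R4, List.find?, List.isPrefixOf])]
          rw [scanSub_cons_some
            (show List.find? _ [(['M','b','p'], ['M','B','P'])] = some (['M','b','p'], ['M','B','P'])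
              by simp [List.find?, List.isPrefixOf])]
          rw [scanSub_cons_some (R := RX5)
            (show List.find? _ RX5 = some (['M','b','p'], ['M','B','P']) by
              simp [RX5, List.find?, List.isPrefixOf])]
          rw [show List.drop (['M','b','p'].length - 1) ('b' :: 'p' :: scanSub R4 s2)
            = scanSub R4 s2 from rfl]
          rw [show List.drop (['M','b','p'].length - 1) ('b' :: 'p' :: s2) = s2 from rfl]
          rw [IH s2 hs2n]
        · have hedmbp : ¬ ('E' :: 'd' :: 'm' :: 'b' :: 'p' :: []) <+: (c :: u) := by
            intro h
            exact hnof (['E','d','m'], ['E','D','M']) (by simp [R4])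
              (List.IsPrefix.trans (by decide) h)
          have hf' : List.find? (fun r => !r.1.isEmpty && r.1.isPrefixOf (c :: u)) RX5
              = none := by
            rw [List.find?_eq_none]
            intro r hr
            rcases (show r = (['E','d','m','b','p'], ['E','D','M','B','P']) ∨ r = (['E','d','m'], ['E','D','M']) ∨
                r = (['D','n','b'], ['D','n','B']) ∨ r = (['U','k'], ['U','K']) ∨
                r = (['P','o','v'], ['P','O','V']) ∨ r = (['M','b','p'], ['M','B','P']) by
              simpa [RX5] using hr) with rfl | rfl | rfl | rfl | rfl | rfl
            · intro hp
              exact hedmbp (List.isPrefixOf_iff_prefix.mp ((Bool.and_eq_true _ _).mp hp).2)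
            · exact List.find?_eq_none.mp hf (['E','d','m'], ['E','D','M']) (by simp [R4])
            · exact List.find?_eq_none.mp hf (['D','n','b'], ['D','n','B']) (by simp [R4])
            · exact List.find?_eq_none.mp hf (['U','k'], ['U','K']) (by simp [R4])
            · exact List.find?_eq_none.mp hf (['P','o','v'], ['P','O','V']) (by simp [R4])
            · intro hp
              exact hmbp (List.isPrefixOf_iff_prefix.mp ((Bool.and_eq_true _ _).mp hp).2)
          rw [scanSub_cons_none hf, scanSub_cons_none hf']
          have hfind1 : List.find? (fun r => !r.1.isEmpty &&
              r.1.isPrefixOf (c :: scanSub R4 u)) [(['M','b','p'], ['M','B','P'])] = none := by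
            have hnp : ¬ (['M','b','p'] <+: (c :: scanSub R4 u)) := by
              intro hpre
              rw [show (['M','b','p'] : List Char) = 'M' :: 'b' :: 'p' :: [] from rfl,
                List.cons_prefix_cons] at hpre
              have hkt : ('b' :: 'p' :: []) <+: u :=
                scan_prefix_reflect R4 (by decide) _ (by simp [R4]) u hpre.2
              exact hmbp (List.cons_prefix_cons.mpr ⟨hpre.1, hkt⟩)
            have : List.isPrefixOf ['M','b','p'] (c :: scanSub R4 u) = false := by
              rw [← Bool.not_eq_true, List.isPrefixOf_iff_prefix]; exact hnp
            simp [List.find?, this]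
          rw [scanSub_cons_none hfind1, IH u hu]
def RX7 : List (List Char × List Char) := (['E','d','m','b','p'], ['E','D','M','B','P']) :: acronyms

theorem scanRX_eq : ∀ t : List Char, ¬ (['E','d','m','b','p'] <:+: t) →
    scanSub RX7 t = scanSub acronyms t := by
  suffices H : ∀ n (t : List Char), t.length ≤ n → ¬ (['E','d','m','b','p'] <:+: t) →
      scanSub RX7 t = scanSub acronyms t from fun t => H t.length t le_rfl
  intro n
  induction n with
  | zero =>
    intro t ht _
    rw [List.length_eq_zero_iff.mp (Nat.le_zero.mp ht)]
    rfl
  | succ n IH =>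
    intro t ht h
    cases t with
    | nil => rfl
    | cons c u =>
      have hu : u.length ≤ n := by simpa using ht
      have hpre : ¬ (['E','d','m','b','p'] <+: (c :: u)) := fun hp => h hp.isInfix
      have hfeq : List.find? (fun r => !r.1.isEmpty && r.1.isPrefixOf (c :: u)) RX7
          = List.find? (fun r => !r.1.isEmpty && r.1.isPrefixOf (c :: u)) acronyms := by
        rw [show RX7 = (['E','d','m','b','p'], ['E','D','M','B','P']) :: acronyms from rfl,
          List.find?_cons_of_neg]
        have : List.isPrefixOf ['E','d','m','b','p'] (c :: u) = false := by
          rw [← Bool.not_eq_true, List.isPrefixOf_iff_prefix]; exact hpre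
        simp [this]
      cases hf : List.find? (fun r => !r.1.isEmpty && r.1.isPrefixOf (c :: u)) acronyms with
      | some r =>
        obtain ⟨k, v⟩ := r
        rw [scanSub_cons_some hf, scanSub_cons_some (hfeq.trans hf)]
        have hrec : ¬ (['E','d','m','b','p'] <:+: u.drop (k.length - 1)) := fun hi =>
          h (hi.trans ((List.drop_suffix _ u).isInfix.trans (List.suffix_cons c u).isInfix))
        rw [IH _ (le_trans (by simp) hu) hrec]
      | none =>
        rw [scanSub_cons_none hf, scanSub_cons_none (hfeq.trans hf)]
        rw [IH u hu (fun hi => h (hi.trans (List.suffix_cons c u).isInfix))]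

theorem step_eq' (g k v : List Char) (hk : k ≠ []) :
    (if PySem.Chars.isIn k g then PySem.Chars.replace g k v else g) = scanSub [(k, v)] g :=
  step_eq g (k, v) hk

theorem seq_eq_RX7 (t : List Char) :
    List.foldl (fun g kv => if PySem.Chars.isIn kv.1 g then PySem.Chars.replace g kv.1 kv.2 else g)
      t acronyms = scanSub RX7 t := by
  have f2 := fusion [(['E','d','m'], ['E','D','M'])] ['D','n','b'] ['D','n','B']
    (by decide) (by decide) (by decide) (by decide) (by simp)
  have f3 := fusion [(['E','d','m'], ['E','D','M']), (['D','n','b'], ['D','n','B'])]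
    ['U','k'] ['U','K'] (by decide) (by decide) (by decide) (by decide) (by simp)
  have f4 := fusion [(['E','d','m'], ['E','D','M']), (['D','n','b'], ['D','n','B']),
    (['U','k'], ['U','K'])] ['P','o','v'] ['P','O','V']
    (by decide) (by decide) (by decide) (by decide) (by simp)
  have f6 := fusion RX5 ['A','t','l'] ['A','T','L']
    (by decide) (by decide) (by decide) (by decide) (by simp [RX5])
  have f7 := fusion [(['E','d','m','b','p'], ['E','D','M','B','P']), (['E','d','m'], ['E','D','M']),
    (['D','n','b'], ['D','n','B']), (['U','k'], ['U','K']), (['P','o','v'], ['P','O','V']),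
    (['M','b','p'], ['M','B','P']), (['A','t','l'], ['A','T','L'])] ['N','y','c'] ['N','Y','C']
    (by decide) (by decide) (by decide) (by decide) (by simp)
  simp only [acronyms, List.foldl]
  rw [step_eq' _ _ _ (by decide), step_eq' _ _ _ (by decide), step_eq' _ _ _ (by decide),
    step_eq' _ _ _ (by decide), step_eq' _ _ _ (by decide), step_eq' _ _ _ (by decide),
    step_eq' _ _ _ (by decide)]
  rw [show (("Edm".toList : List Char), ("EDM".toList : List Char))
    = (['E','d','m'], ['E','D','M']) from rfl]
  rw [show (("Dnb".toList : List Char), ("DnB".toList : List Char))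
    = (['D','n','b'], ['D','n','B']) from rfl]
  rw [show (("Uk".toList : List Char), ("UK".toList : List Char))
    = (['U','k'], ['U','K']) from rfl]
  rw [show (("Pov".toList : List Char), ("POV".toList : List Char))
    = (['P','o','v'], ['P','O','V']) from rfl]
  rw [show (("Mbp".toList : List Char), ("MBP".toList : List Char))
    = (['M','b','p'], ['M','B','P']) from rfl]
  rw [show (("Atl".toList : List Char), ("ATL".toList : List Char))
    = (['A','t','l'], ['A','T','L']) from rfl]
  rw [show (("Nyc".toList : List Char), ("NYC".toList : List Char))
    = (['N','y','c'], ['N','Y','C']) from rfl]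
  rw [f2 t]; simp only [List.cons_append, List.nil_append]
  rw [f3 t]; simp only [List.cons_append, List.nil_append]
  rw [f4 t]; simp only [List.cons_append, List.nil_append]
  rw [show scanSub [(['E','d','m'], ['E','D','M']), (['D','n','b'], ['D','n','B']),
    (['U','k'], ['U','K']), (['P','o','v'], ['P','O','V'])] t = scanSub R4 t from rfl]
  rw [fusionMbp t]
  rw [f6 t]
  rw [show RX5 ++ [(['A','t','l'], ['A','T','L'])]
    = [(['E','d','m','b','p'], ['E','D','M','B','P']), (['E','d','m'], ['E','D','M']),
       (['D','n','b'], ['D','n','B']), (['U','k'], ['U','K']), (['P','o','v'], ['P','O','V']),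
       (['M','b','p'], ['M','B','P']), (['A','t','l'], ['A','T','L'])] from rfl]
  rw [f7 t]; simp only [List.cons_append, List.nil_append]
  rfl

-- A's seven sequential passes equal B's one simultaneous pass, absent 'Edmbp'
theorem seq_eq (t : List Char) (h : ¬ (['E','d','m','b','p'] <:+: t)) :
    List.foldl (fun g kv => if PySem.Chars.isIn kv.1 g then PySem.Chars.replace g kv.1 kv.2 else g)
      t acronyms = scanSub acronyms t :=
  (seq_eq_RX7 t).trans (scanRX_eq t h)

theorem infix_behead (x : Char) (hx : x ≠ 'E') (s : List Char)
    (h : ['E','d','m','b','p'] <:+: x :: s) : ['E','d','m','b','p'] <:+: s := by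
  rcases List.infix_cons_iff.mp h with hp | hi
  · exact absurd (List.cons_prefix_cons.mp hp).1.symm hx
  · exact hi

theorem infix_drop_of_prefix (w : List Char) :
    ∀ s : List Char, (∀ x ∈ w, x ≠ 'E') → w <+: s → ['E','d','m','b','p'] <:+: s →
      ['E','d','m','b','p'] <:+: s.drop w.length := by
  induction w with
  | nil => intro s _ _ h; simpa using h
  | cons a w' IHw =>
    intro s hw hpre h
    cases s with
    | nil => simp at hpre
    | cons b s' =>
      obtain ⟨hab, hw'⟩ := List.cons_prefix_cons.mp hpre
      exact IHw s' (fun x hx => hw x (by simp [hx]))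
        hw' (infix_behead b (hab ▸ hw a (by simp)) s' h)

-- with an 'Edmbp' occurrence the cascade rule makes the two scans differ
theorem scanRX_ne : ∀ t : List Char, ['E','d','m','b','p'] <:+: t →
    scanSub RX7 t ≠ scanSub acronyms t := by
  suffices H : ∀ n (t : List Char), t.length ≤ n → ['E','d','m','b','p'] <:+: t →
      scanSub RX7 t ≠ scanSub acronyms t from fun t => H t.length t le_rfl
  intro n
  induction n with
  | zero =>
    intro t ht h
    rw [List.length_eq_zero_iff.mp (Nat.le_zero.mp ht)] at h
    exact absurd h.length_le (by simp)
  | succ n IH =>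
    intro t ht h
    cases t with
    | nil => exact absurd h.length_le (by simp)
    | cons c u =>
      have hu : u.length ≤ n := by simpa using ht
      by_cases hp : ['E','d','m','b','p'] <+: (c :: u)
      · obtain ⟨w, hw⟩ := hp
        simp only [List.cons_append, List.nil_append] at hw
        obtain ⟨rfl, rfl⟩ : c = 'E' ∧ u = 'd' :: 'm' :: 'b' :: 'p' :: w := by
          exact ⟨(List.cons.injEq _ _ _ _ ▸ hw).1.symm, by
            have := (List.cons.injEq _ _ _ _ ▸ hw).2
            exact this.symm⟩
        rw [scanSub_cons_some (R := RX7)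
          (show List.find? _ RX7 = some (['E','d','m','b','p'], ['E','D','M','B','P']) by
            simp [RX7, acronyms, List.isPrefixOf])]
        rw [scanSub_cons_some (R := acronyms)
          (show List.find? _ acronyms = some ("Edm".toList, "EDM".toList) by
            simp [acronyms, List.find?, List.isPrefixOf])]
        rw [show List.drop ((['E','d','m','b','p'] : List Char).length - 1)
          ('d' :: 'm' :: 'b' :: 'p' :: w) = w from rfl]
        rw [show List.drop (("Edm".toList : List Char).length - 1)
          ('d' :: 'm' :: 'b' :: 'p' :: w) = 'b' :: 'p' :: w from rfl]
        rw [scanSub_cons_none (R := acronyms) (by simp [acronyms, List.find?, List.isPrefixOf])]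
        rw [scanSub_cons_none (R := acronyms) (by simp [acronyms, List.find?, List.isPrefixOf])]
        intro heq
        simp [List.cons.injEq] at heq
      · have hui : ['E','d','m','b','p'] <:+: u := (List.infix_cons_iff.mp h).resolve_left hp
        have hpf : List.isPrefixOf ['E','d','m','b','p'] (c :: u) = false := by
          rw [← Bool.not_eq_true, List.isPrefixOf_iff_prefix]; exact hp
        cases hf : List.find? (fun r => !r.1.isEmpty && r.1.isPrefixOf (c :: u)) acronyms with
        | none =>
          have hf' : List.find? (fun r => !r.1.isEmpty && r.1.isPrefixOf (c :: u)) RX7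
              = none := by
            rw [show RX7 = (['E','d','m','b','p'], ['E','D','M','B','P']) :: acronyms from rfl,
              List.find?_cons_of_neg]
            · exact hf
            · simp [hpf]
          rw [scanSub_cons_none hf, scanSub_cons_none hf']
          intro heq
          exact IH u hu hui (by injection heq)
        | some r =>
          obtain ⟨k, v⟩ := r
          have hf' : List.find? (fun r => !r.1.isEmpty && r.1.isPrefixOf (c :: u)) RX7
              = some (k, v) := by
            rw [show RX7 = (['E','d','m','b','p'], ['E','D','M','B','P']) :: acronyms from rfl,
              List.find?_cons_of_neg]
            · exact hf
            · simp [hpf]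
          rw [scanSub_cons_some hf, scanSub_cons_some hf']
          have hmem := List.mem_of_find?_eq_some hf
          have hpt := List.find?_some hf
          have hpt' : k ≠ [] ∧ k <+: (c :: u) := by simpa using hpt
          have hkE : ∀ x ∈ k.tail, x ≠ 'E' := by
            rcases (show (k, v) = ("Edm".toList, "EDM".toList) ∨ (k, v) = ("Dnb".toList, "DnB".toList) ∨
                (k, v) = ("Uk".toList, "UK".toList) ∨ (k, v) = ("Pov".toList, "POV".toList) ∨
                (k, v) = ("Mbp".toList, "MBP".toList) ∨ (k, v) = ("Atl".toList, "ATL".toList) ∨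
                (k, v) = ("Nyc".toList, "NYC".toList) by
              simpa [acronyms] using hmem) with hkv | hkv | hkv | hkv | hkv | hkv | hkv <;>
              (rw [Prod.mk.injEq] at hkv; obtain ⟨rfl, rfl⟩ := hkv) <;> simp
          have hdrop : ['E','d','m','b','p'] <:+: u.drop (k.length - 1) := by
            cases k with
            | nil => exact absurd rfl hpt'.1
            | cons kh kt =>
              exact infix_drop_of_prefix kt u (fun x hx => hkE x (by simpa using hx))
                (List.cons_prefix_cons.mp hpt'.2).2 hui
          intro heq
          exact IH _ (le_trans (by simp) hu) hdrop (List.append_cancel_left heq)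

-- B's port in A's vocabulary: same table, same title pass
theorem alt_eq (genre : String) :
    capitalize_genre_alt genre = String.ofList (scanSub acronyms (titleChars genre.toList)) := by
  unfold capitalize_genre_alt
  rw [titleB_eq, subsB_eq]

-- ===== VERDICT (by name: the statement is the Claim_ definition above) =====
theorem capitalize_genre_spec : Claim_unchanged_capitalize_genre := by
  intro genre _
  unfold Spec_capitalize_genre
  intro hND
  rw [alt_eq]
  unfold capitalize_genre
  refine congrArg String.ofList ?_
  apply seq_eq
  intro hinf
  apply hND
  unfold D_capitalize_genre
  apply (PySem.Str.isIn_iff_infix _ _).mpr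
  simpa using hinf

theorem capitalize_genre_changed : Claim_changed_capitalize_genre := by
  unfold Claim_changed_capitalize_genre; decide

theorem capitalize_genre_tight : Claim_exact_capitalize_genre := by
  intro genre _ hD
  unfold D_capitalize_genre at hD
  have hinf : ['E','d','m','b','p'] <:+: titleChars genre.toList := by
    simpa using (PySem.Str.isIn_iff_infix _ _).mp hD
  rw [alt_eq]
  unfold capitalize_genre
  rw [seq_eq_RX7]
  intro heq
  exact scanRX_ne _ hinf (by
    have := congrArg String.toList heq
    simpa using this)
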